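-- pv_equiv track=rewrite | github.com/LiRiordan/Partial_flag_Schubert | PycharmProjects/PartialFlagSchubert/main.py | ind_flattener
-- ===== SOURCE A (Python) =====
-- def ind_flattener(i):
--     T = [0,0,0,0]
--     M = [0,1,2,3]
--     G = [[l,k] for (l,k) in zip(M,i)]
--     G = sorted(G,key = lambda x : x[1])
--     for s in M:
--         T[G[s][0]] = s + 1
--     return T
-- ===== SOURCE B (Python) =====
-- def ind_flattener(i):
--     return [1
--             + sum(1 for k in range(4) if i[k] < i[j])
--             + sum(1 for k in range(j) if i[k] == i[j])
--             for j in range(4)]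
-- ===== Notes on version B (the rewrite author's own statement) =====
-- stated objective: simpler
-- what changed: Replaces the sort-then-scatter (build index/value pairs, stable-sort by value, write ranks through the permutation) with a direct rank formula: each position's rank is 1 + (number of strictly smaller values) + (number of equal values at earlier positions), so no sort and no in-place list writes.
import Mathlib
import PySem

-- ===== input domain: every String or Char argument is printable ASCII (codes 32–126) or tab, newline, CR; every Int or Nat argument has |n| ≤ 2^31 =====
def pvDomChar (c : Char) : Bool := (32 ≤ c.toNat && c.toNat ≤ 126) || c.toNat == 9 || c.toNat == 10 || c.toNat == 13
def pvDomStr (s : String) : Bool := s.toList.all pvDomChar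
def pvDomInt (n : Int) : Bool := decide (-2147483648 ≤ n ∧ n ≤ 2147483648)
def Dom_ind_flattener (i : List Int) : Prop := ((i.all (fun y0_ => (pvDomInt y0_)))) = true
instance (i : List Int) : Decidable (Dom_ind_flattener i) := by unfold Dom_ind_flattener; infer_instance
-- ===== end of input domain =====

-- B replaces A's stable sort of (index, value) pairs and rank scatter by a direct pairwise-count
-- rank formula (strictly-smaller count plus earlier-equal count); objective: simpler.

-- ===== PORT A =====
def ind_flattener (i : List Int) : List Int :=
  let T : List Int := [0, 0, 0, 0]
  let M : List Int := [0, 1, 2, 3]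
  let G : List (Int × Int) := List.zip M i
  let G' := PySem.List.sorted G (fun x => x.2) false
  M.foldl (fun T s => PySem.List.pySetD T (PySem.List.pyGetD G' s (0, 0)).1 (s + 1)) T

-- ===== PORT B =====
def ind_flattener_alt (i : List Int) : List Int :=
  (List.range 4).map (fun (j : Nat) =>
    1 + ((List.range 4).map (fun (k : Nat) =>
           if PySem.List.pyGetD i (k : Int) 0 < PySem.List.pyGetD i (j : Int) 0 then (1 : Int) else 0)).sum
      + ((List.range j).map (fun (k : Nat) =>
           if PySem.List.pyGetD i (k : Int) 0 == PySem.List.pyGetD i (j : Int) 0 then (1 : Int) else 0)).sum)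

-- ===== PRECONDITION & SPEC =====
-- Python A raises IndexError (G[s] for s up to 3 after zip truncates) exactly when len(i) < 4;
-- B raises IndexError there too (i[j] for j in range(4)).
def Pre_ind_flattener (i : List Int) : Prop := 4 ≤ i.length
instance (i : List Int) : Decidable (Pre_ind_flattener i) := by unfold Pre_ind_flattener; infer_instance
def pvWitness_ind_flattener : List Int := [3, 1, 2, 1]

def Spec_ind_flattener (i : List Int) (out : List Int) : Prop := out = ind_flattener_alt i
instance (i : List Int) (out : List Int) : Decidable (Spec_ind_flattener i out) := by unfold Spec_ind_flattener; infer_instance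

-- ===== CLAIM (what is proved, stated in full; the proofs are below) =====
def Claim_equal_ind_flattener : Prop := ∀ (i : List Int), Dom_ind_flattener i → Pre_ind_flattener i → Spec_ind_flattener i (ind_flattener i)

-- ===== LEMMAS AND PROOFS =====
theorem pv_g1 {α : Type} [Inhabited α] (a b : α) (xs : List α) (d : α) : PySem.List.pyGetD (a::b::xs) 1 d = b := by
  simp [PySem.List.pyGetD, PySem.List.pyGet?, PySem.List.pyIdx?]
theorem pv_g2 {α : Type} [Inhabited α] (a b c : α) (xs : List α) (d : α) : PySem.List.pyGetD (a::b::c::xs) 2 d = c := by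
  simp [PySem.List.pyGetD, PySem.List.pyGet?, PySem.List.pyIdx?]; rw [if_pos (by omega)]; simp
theorem pv_g3 {α : Type} [Inhabited α] (a b c d : α) (xs : List α) (e : α) : PySem.List.pyGetD (a::b::c::d::xs) 3 e = d := by
  simp [PySem.List.pyGetD, PySem.List.pyGet?, PySem.List.pyIdx?]; rw [if_pos (by omega)]; simp
theorem pv_s0 (p q s t v : Int) : PySem.List.pySetD [p,q,s,t] 0 v = [v,q,s,t] := by
  simp [PySem.List.pySetD, PySem.List.pySet?, PySem.List.pyIdx?]
theorem pv_s1 (p q s t v : Int) : PySem.List.pySetD [p,q,s,t] 1 v = [p,v,s,t] := by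
  simp [PySem.List.pySetD, PySem.List.pySet?, PySem.List.pyIdx?]
theorem pv_s2 (p q s t v : Int) : PySem.List.pySetD [p,q,s,t] 2 v = [p,q,v,t] := by
  simp [PySem.List.pySetD, PySem.List.pySet?, PySem.List.pyIdx?]
theorem pv_s3 (p q s t v : Int) : PySem.List.pySetD [p,q,s,t] 3 v = [p,q,s,v] := by
  simp [PySem.List.pySetD, PySem.List.pySet?, PySem.List.pyIdx?]

set_option maxHeartbeats 1000000 in
theorem pv_core (a b c d : Int) (r : List Int) :
    ind_flattener (a::b::c::d::r) = ind_flattener_alt (a::b::c::d::r) := by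
  have lab : (a < b) ↔ compare a b = Ordering.lt := compare_lt_iff_lt.symm
  have lac : (a < c) ↔ compare a c = Ordering.lt := compare_lt_iff_lt.symm
  have lad : (a < d) ↔ compare a d = Ordering.lt := compare_lt_iff_lt.symm
  have lbc : (b < c) ↔ compare b c = Ordering.lt := compare_lt_iff_lt.symm
  have lbd : (b < d) ↔ compare b d = Ordering.lt := compare_lt_iff_lt.symm
  have lcd : (c < d) ↔ compare c d = Ordering.lt := compare_lt_iff_lt.symm
  have gab : (b < a) ↔ compare a b = Ordering.gt := by rw [compare_gt_iff_gt]
  have gac : (c < a) ↔ compare a c = Ordering.gt := by rw [compare_gt_iff_gt]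
  have gad : (d < a) ↔ compare a d = Ordering.gt := by rw [compare_gt_iff_gt]
  have gbc : (c < b) ↔ compare b c = Ordering.gt := by rw [compare_gt_iff_gt]
  have gbd : (d < b) ↔ compare b d = Ordering.gt := by rw [compare_gt_iff_gt]
  have gcd : (d < c) ↔ compare c d = Ordering.gt := by rw [compare_gt_iff_gt]
  have eab : (a = b) ↔ compare a b = Ordering.eq := compare_eq_iff_eq.symm
  have eac : (a = c) ↔ compare a c = Ordering.eq := compare_eq_iff_eq.symm
  have ead : (a = d) ↔ compare a d = Ordering.eq := compare_eq_iff_eq.symm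
  have ebc : (b = c) ↔ compare b c = Ordering.eq := compare_eq_iff_eq.symm
  have ebd : (b = d) ↔ compare b d = Ordering.eq := compare_eq_iff_eq.symm
  have ecd : (c = d) ↔ compare c d = Ordering.eq := compare_eq_iff_eq.symm
  rcases h1 : compare a b <;> rcases h2 : compare a c <;> rcases h3 : compare a d <;>
  rcases h4 : compare b c <;> rcases h5 : compare b d <;> rcases h6 : compare c d <;>
  (try (exfalso;
        simp only [compare_lt_iff_lt, compare_eq_iff_eq, compare_gt_iff_gt] at h1 h2 h3 h4 h5 h6;
        omega)) <;>
  (simp [ind_flattener, ind_flattener_alt, PySem.List.sorted, PySem.List.insertBy,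
     List.zip, List.zipWith,
     show List.range 4 = [0, 1, 2, 3] from rfl, show List.range 3 = [0, 1, 2] from rfl,
     show List.range 2 = [0, 1] from rfl, show List.range 1 = [0] from rfl,
     show List.range 0 = ([] : List Nat) from rfl,
     pv_g1, pv_g2, pv_g3, pv_s0, pv_s1, pv_s2, pv_s3, beq_iff_eq,
     lab, lac, lad, lbc, lbd, lcd, gab, gac, gad, gbc, gbd, gcd,
     eab, eac, ead, ebc, ebd, ecd, h1, h2, h3, h4, h5, h6])

-- ===== VERDICT (by name: the statement is the Claim_ definition above) =====
theorem ind_flattener_spec : Claim_equal_ind_flattener := by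
  intro i _ hpre
  unfold Spec_ind_flattener
  match i, hpre with
  | a :: b :: c :: d :: r, _ => exact pv_core a b c d r
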